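-- pv_equiv track=rewrite | github.com/abrahamshimekt/Competitive-Programming-Problem-Solutions | x_sum/d_x_sum.py | sub_diagonal_sum
-- ===== SOURCE A (Python) =====
-- def sub_diagonal_sum(grid,m,n):
--     sub_diagobal = {}
--
--     for col in range(n):
--         c = col
--         r = 0
--         curr_sum = 0
--         row_col = []
--         while r < m and c > -1:
--             curr_sum += int(grid[r][c])
--             row_col.append((r,c))
--             r +=1
--             c -=1
--         for pair in row_col:
--             sub_diagobal[pair] = curr_sum
--
--     for row in range(1,m):
--         r = row
--         c = n-1
--         curr_sum = 0
--         row_col = []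
--         while r < m and c > -1:
--             curr_sum += int(grid[r][c])
--             row_col.append((r,c))
--             r +=1
--             c -=1
--         for pair in row_col:
--             sub_diagobal[pair] = curr_sum
--     return sub_diagobal
-- ===== SOURCE B (Python) =====
-- def sub_diagonal_sum(grid, m, n):
--     # Pass 1: accumulate each anti-diagonal's sum, keyed by the diagonal index r + c.
--     diag_sum = {}
--     for r in range(m):
--         for c in range(n):
--             diag_sum[r + c] = diag_sum.get(r + c, 0) + int(grid[r][c])
--     # Pass 2: enumerate each diagonal's cells by closed-form row range and assign its sum.
--     result = {}
--     for d in range(m + n - 1):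
--         for r in range(max(0, d - n + 1), min(m, d + 1)):
--             result[(r, d - r)] = diag_sum[d]
--     return result
-- ===== Notes on version B (the rewrite author's own statement) =====
-- stated objective: alternative
-- what changed: A walks each anti-diagonal explicitly with while-loops seeded from the top row and the right column, accumulating the cell list and sum together; B does one row-major pass accumulating diagonal sums into a dict keyed by r+c, then a second pass that enumerates each diagonal's cells by a closed-form row range and assigns the stored sum.
import Mathlib
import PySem

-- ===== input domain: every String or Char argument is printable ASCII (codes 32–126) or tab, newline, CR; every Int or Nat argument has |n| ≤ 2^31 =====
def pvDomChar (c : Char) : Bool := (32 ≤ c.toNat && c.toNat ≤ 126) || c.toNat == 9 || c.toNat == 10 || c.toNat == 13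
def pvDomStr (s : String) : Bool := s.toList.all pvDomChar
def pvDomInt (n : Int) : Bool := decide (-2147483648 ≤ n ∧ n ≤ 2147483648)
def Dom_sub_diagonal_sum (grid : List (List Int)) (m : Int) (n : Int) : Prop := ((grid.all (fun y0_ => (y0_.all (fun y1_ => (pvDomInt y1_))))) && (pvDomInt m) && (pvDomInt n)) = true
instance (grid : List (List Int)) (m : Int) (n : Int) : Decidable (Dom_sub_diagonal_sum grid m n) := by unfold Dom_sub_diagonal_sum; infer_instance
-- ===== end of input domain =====

-- B replaces A's explicit diagonal walks (while-loops seeded from the top row and the right column) by a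
-- row-major accumulation pass keyed by the diagonal index r+c and a closed-form enumeration pass:
-- a genuinely different decomposition of the same job (no speed claim).

-- ===== PORT A =====
-- A's while loop: walk down-left from (r, c), accumulating the running sum and the visited pairs.
-- grid[r][c] is ported as pyGetD; the index is in range under Pre_sub_diagonal_sum, so the default is never used.
def pvWalkA (grid : List (List Int)) (m : Int) (r c currSum : Int) (rowCol : List (Int × Int)) :
    Int × List (Int × Int) :=
  if _h : r < m ∧ -1 < c then
    pvWalkA grid m (r + 1) (c - 1)
      (currSum + PySem.List.pyGetD (PySem.List.pyGetD grid r []) c 0) (rowCol ++ [(r, c)])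
  else (currSum, rowCol)
termination_by (m - r).toNat
decreasing_by omega

def sub_diagonal_sum (grid : List (List Int)) (m : Int) (n : Int) : List (Int × Int × Int) :=
  ((PySem.List.pyRange 1 m 1).foldl (fun dAcc row =>
      (pvWalkA grid m row (n - 1) 0 []).2.foldl
        (fun dAcc pair => dAcc.insert pair (pvWalkA grid m row (n - 1) 0 []).1) dAcc)
    ((PySem.List.pyRange 0 n 1).foldl (fun dAcc col =>
      (pvWalkA grid m 0 col 0 []).2.foldl
        (fun dAcc pair => dAcc.insert pair (pvWalkA grid m 0 col 0 []).1) dAcc)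
      (PySem.Dict.empty : PySem.Dict (Int × Int) Int))).items.map (fun p => (p.1.1, p.1.2, p.2))

-- ===== PORT B =====
-- grid[r][c] and diag_sum[d] are ported with defaults that are never used on Pre_sub_diagonal_sum
-- (every accessed cell is in range; every enumerated diagonal was filled in pass 1).
def sub_diagonal_sum_alt (grid : List (List Int)) (m : Int) (n : Int) : List (Int × Int × Int) :=
  ((PySem.List.pyRange 0 (m + n - 1) 1).foldl (fun res d =>
      (PySem.List.pyRange (max 0 (d - n + 1)) (min m (d + 1)) 1).foldl
        (fun res r => res.insert (r, d - r)
          (((PySem.List.pyRange 0 m 1).foldl (fun ds r => (PySem.List.pyRange 0 n 1).foldl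
              (fun ds c => ds.insert (r + c) (ds.getD (r + c) 0
                + PySem.List.pyGetD (PySem.List.pyGetD grid r []) c 0)) ds)
            (PySem.Dict.empty : PySem.Dict Int Int)).getD d 0)) res)
    (PySem.Dict.empty : PySem.Dict (Int × Int) Int)).items.map (fun p => (p.1.1, p.1.2, p.2))

-- ===== PRECONDITION & SPEC =====
-- Pre_ excludes exactly the inputs on which A raises IndexError: when there are cells to visit
-- (0 < m and 0 < n), the grid must have at least m rows and each of the first m rows at least n entries.
def Pre_sub_diagonal_sum (grid : List (List Int)) (m : Int) (n : Int) : Prop :=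
  (0 < m ∧ 0 < n) → (m ≤ (grid.length : Int) ∧ ∀ row ∈ grid.take m.toNat, n ≤ (row.length : Int))
instance (grid : List (List Int)) (m : Int) (n : Int) : Decidable (Pre_sub_diagonal_sum grid m n) := by
  unfold Pre_sub_diagonal_sum; infer_instance

def pvWitness_sub_diagonal_sum : List (List Int) × Int × Int := ([[1, 2], [3, 4]], 2, 2)

def Spec_sub_diagonal_sum (grid : List (List Int)) (m : Int) (n : Int) (out : List (Int × Int × Int)) : Prop := out = sub_diagonal_sum_alt grid m n
instance (grid : List (List Int)) (m : Int) (n : Int) (out : List (Int × Int × Int)) : Decidable (Spec_sub_diagonal_sum grid m n out) := by unfold Spec_sub_diagonal_sum; infer_instance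

-- ===== CLAIM (what is proved, stated in full; the proofs are below) =====
def Claim_equal_sub_diagonal_sum : Prop := ∀ (grid : List (List Int)) (m : Int) (n : Int), Dom_sub_diagonal_sum grid m n → Pre_sub_diagonal_sum grid m n → Spec_sub_diagonal_sum grid m n (sub_diagonal_sum grid m n)

-- ===== LEMMAS AND PROOFS =====

-- the rows of anti-diagonal d inside an m×n grid
def pvRows (m n d : Int) : List Int :=
  PySem.List.pyRange (max 0 (d - n + 1)) (min m (d + 1)) 1

-- the sum of anti-diagonal d
def pvS (grid : List (List Int)) (m n d : Int) : Int :=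
  ((pvRows m n d).map
    (fun r => PySem.List.pyGetD (PySem.List.pyGetD grid r []) (d - r) 0)).sum

-- the canonical item list both dicts end up with
def pvL (grid : List (List Int)) (m n : Int) : List ((Int × Int) × Int) :=
  (PySem.List.pyRange 0 (m + n - 1) 1).flatMap
    (fun d => (pvRows m n d).map (fun r => ((r, d - r), pvS grid m n d)))

-- == generic interval / filter facts ==

lemma pv_filter_pyRange_interval (lo hi : Int) : ∀ (k : ℕ) (a b : Int), (b - a).toNat = k →
    (PySem.List.pyRange a b 1).filter (fun r => decide (lo ≤ r ∧ r < hi))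
      = PySem.List.pyRange (max a lo) (min b hi) 1 := by
  intro k
  induction k with
  | zero =>
    intro a b hk
    rw [PySem.List.pyRange_one_eq_nil (by omega), PySem.List.pyRange_one_eq_nil (by omega)]
    rfl
  | succ k ih =>
    intro a b hk
    have hab : a < b := by omega
    rw [PySem.List.pyRange_one_cons hab, List.filter_cons]
    by_cases hpa : lo ≤ a ∧ a < hi
    · have h1 : max a lo = a := by omega
      have h2 : max (a + 1) lo = a + 1 := by omega
      have h3 : a < min b hi := by omega
      rw [ih (a + 1) b (by omega), h2, h1, PySem.List.pyRange_one_cons h3]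
      simp [hpa]
    · have hf : (decide (lo ≤ a ∧ a < hi)) = false := by simp [hpa]
      rw [ih (a + 1) b (by omega), hf]
      simp only [Bool.false_eq_true, if_false]
      rcases not_and_or.mp hpa with h | h
      · have h1 : max a lo = max (a + 1) lo := by omega
        rw [h1]
      · rw [PySem.List.pyRange_one_eq_nil (show min b hi ≤ max (a + 1) lo by omega),
            PySem.List.pyRange_one_eq_nil (show min b hi ≤ max a lo by omega)]

lemma pv_sum_map_ite_zero (p : Int → Prop) [DecidablePred p] (f : Int → Int) :
    ∀ (l : List Int),
      (l.map (fun r => if p r then f r else 0)).sum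
        = ((l.filter (fun r => decide (p r))).map f).sum := by
  intro l
  induction l with
  | nil => rfl
  | cons x t ih =>
    by_cases hx : p x <;> simp [hx, ih]

-- == pass-1 of B: accumulated dict lookups ==

lemma pv_getD_foldl_insert_addg (key : Int → Int) (g : Int → Int) :
    ∀ (l : List Int) (d : PySem.Dict Int Int) (v : Int),
      (l.foldl (fun d x => d.insert (key x) (d.getD (key x) 0 + g x)) d).getD v 0
        = d.getD v 0 + ((l.filter (fun x => key x == v)).map g).sum := by
  intro l
  induction l with
  | nil => simp
  | cons x t ih =>
    intro d v
    simp only [List.foldl_cons, List.filter_cons]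
    rw [ih]
    by_cases hx : key x = v
    · simp [hx]
      ring
    · have hb : (key x == v) = false := by simp [hx]
      simp [hb, PySem.Dict.getD_insert, Ne.symm hx]

lemma pv_filter_shift (grid : List (List Int)) (n r v : Int) :
    ((PySem.List.pyRange 0 n 1).filter (fun c => r + c == v)).map
        (fun c => PySem.List.pyGetD (PySem.List.pyGetD grid r []) c 0)
      = if 0 ≤ v - r ∧ v - r < n
          then [PySem.List.pyGetD (PySem.List.pyGetD grid r []) (v - r) 0] else [] := by
  have hcongr : (PySem.List.pyRange 0 n 1).filter (fun c => r + c == v)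
      = (PySem.List.pyRange 0 n 1).filter (fun c => c == v - r) := by
    apply List.filter_congr
    intro c _
    rw [Bool.eq_iff_iff]
    simp only [beq_iff_eq]
    omega
  rw [hcongr, List.filter_beq]
  by_cases hmem : (v - r) ∈ PySem.List.pyRange 0 n 1
  · rw [List.count_eq_one_of_mem (PySem.List.nodup_pyRange_one 0 n) hmem]
    rw [if_pos (PySem.List.mem_pyRange_one.mp hmem)]
    rfl
  · rw [List.count_eq_zero_of_not_mem hmem]
    have hno : ¬ (0 ≤ v - r ∧ v - r < n) := fun h => hmem (PySem.List.mem_pyRange_one.mpr h)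
    rw [if_neg hno]
    rfl

lemma pv_ds_getD (grid : List (List Int)) (n : Int) :
    ∀ (l : List Int) (d : PySem.Dict Int Int) (v : Int),
      (l.foldl (fun ds r => (PySem.List.pyRange 0 n 1).foldl
          (fun ds c => ds.insert (r + c) (ds.getD (r + c) 0
            + PySem.List.pyGetD (PySem.List.pyGetD grid r []) c 0)) ds) d).getD v 0
        = d.getD v 0
          + (l.map (fun r => if 0 ≤ v - r ∧ v - r < n
              then PySem.List.pyGetD (PySem.List.pyGetD grid r []) (v - r) 0 else 0)).sum := by
  intro l
  induction l with
  | nil => simp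
  | cons r t ih =>
    intro d v
    simp only [List.foldl_cons, List.map_cons, List.sum_cons]
    rw [ih]
    rw [pv_getD_foldl_insert_addg (fun c => r + c)
        (fun c => PySem.List.pyGetD (PySem.List.pyGetD grid r []) c 0)]
    rw [pv_filter_shift grid n r v]
    by_cases h : 0 ≤ v - r ∧ v - r < n
    · rw [if_pos h, if_pos h]
      simp only [List.sum_cons, List.sum_nil]
      ring
    · rw [if_neg h, if_neg h]
      simp only [List.sum_nil]
      ring

lemma pv_ds_eq_pvS (grid : List (List Int)) (m n v : Int) :
    ((PySem.List.pyRange 0 m 1).foldl (fun ds r => (PySem.List.pyRange 0 n 1).foldl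
          (fun ds c => ds.insert (r + c) (ds.getD (r + c) 0
            + PySem.List.pyGetD (PySem.List.pyGetD grid r []) c 0)) ds)
        (PySem.Dict.empty : PySem.Dict Int Int)).getD v 0 = pvS grid m n v := by
  rw [pv_ds_getD]
  rw [pv_sum_map_ite_zero (fun r => 0 ≤ v - r ∧ v - r < n)
      (fun r => PySem.List.pyGetD (PySem.List.pyGetD grid r []) (v - r) 0)]
  have hcongr : (PySem.List.pyRange 0 m 1).filter (fun r => decide (0 ≤ v - r ∧ v - r < n))
      = (PySem.List.pyRange 0 m 1).filter (fun r => decide (v - n + 1 ≤ r ∧ r < v + 1)) := by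
    apply List.filter_congr
    intro r _
    rw [Bool.eq_iff_iff]
    simp only [decide_eq_true_eq]
    omega
  rw [hcongr, pv_filter_pyRange_interval (v - n + 1) (v + 1) (m - 0).toNat 0 m (by omega)]
  simp [pvS, pvRows]

lemma pv_items_empty {κ ν : Type} [BEq κ] : (PySem.Dict.empty : PySem.Dict κ ν).items = [] := rfl

-- == the per-diagonal insertion step shared by both builds ==

def pvStep (val : Int → Int) (m n : Int) (dct : PySem.Dict (Int × Int) Int) (d : Int) :
    PySem.Dict (Int × Int) Int :=
  ((pvRows m n d).map (fun r => ((r : Int), d - r))).foldl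
    (fun dct p => dct.insert p (val d)) dct

lemma pv_step_items (val : Int → Int) (m n d : Int) (dct : PySem.Dict (Int × Int) Int)
    (hinv : ∀ p ∈ dct.items, p.1.1 + p.1.2 < d) :
    (pvStep val m n dct d).items
      = dct.items ++ (pvRows m n d).map (fun r => ((r, d - r), val d)) := by
  unfold pvStep
  rw [PySem.Dict.items_foldl_insert_fresh _ (fun p => p) (fun _ => val d) dct ?fresh ?nodup]
  case fresh =>
    intro a ha
    simp only [List.mem_map] at ha
    obtain ⟨r, hr, rfl⟩ := ha
    by_contra hcon
    have hct : dct.contains (r, d - r) = true := by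
      revert hcon; cases h : dct.contains (r, d - r) <;> simp
    rw [PySem.Dict.contains_iff_mem_keys] at hct
    have hmem : (r, d - r) ∈ dct.items.map (fun p => p.1) := hct
    simp only [List.mem_map] at hmem
    obtain ⟨p, hp, hp1⟩ := hmem
    have := hinv p hp
    rw [hp1] at this
    simp at this
  case nodup =>
    rw [List.map_id_fun']
    apply List.Nodup.map _ (PySem.List.nodup_pyRange_one _ _)
    intro x y hxy
    simpa using congrArg Prod.fst hxy
  rw [List.map_map]
  rfl

lemma pv_fold_steps (val : Int → Int) (m n : Int) :
    ∀ (k : ℕ) (D : Int) (dct : PySem.Dict (Int × Int) Int),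
      (∀ p ∈ dct.items, p.1.1 + p.1.2 < D) →
      ((PySem.List.pyRange D (D + k) 1).foldl (pvStep val m n) dct).items
        = dct.items ++ (PySem.List.pyRange D (D + k) 1).flatMap
            (fun d => (pvRows m n d).map (fun r => ((r, d - r), val d))) := by
  intro k
  induction k with
  | zero =>
    intro D dct _
    rw [PySem.List.pyRange_one_eq_nil (by omega)]
    simp
  | succ k ih =>
    intro D dct hinv
    have hD : D < D + (k + 1 : ℕ) := by omega
    rw [PySem.List.pyRange_one_cons hD, List.foldl_cons, List.flatMap_cons]
    have hstep := pv_step_items val m n D dct hinv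
    have hinv' : ∀ p ∈ (pvStep val m n dct D).items, p.1.1 + p.1.2 < D + 1 := by
      intro p hp
      rw [hstep] at hp
      rcases List.mem_append.mp hp with h | h
      · have := hinv p h; omega
      · simp only [List.mem_map] at h
        obtain ⟨r, _, rfl⟩ := h
        simp
    have harith : D + (k + 1 : ℕ) = (D + 1) + (k : ℕ) := by push_cast; ring
    rw [harith, ih (D + 1) _ hinv', hstep, List.append_assoc]

-- == A's while loop ==

lemma pvWalkA_spec (grid : List (List Int)) (m : Int) :
    ∀ (k : ℕ) (r c cs : Int) (rc : List (Int × Int)), (m - r).toNat ≤ k →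
      pvWalkA grid m r c cs rc =
        (cs + ((PySem.List.pyRange r (min m (r + c + 1)) 1).map
            (fun i => PySem.List.pyGetD (PySem.List.pyGetD grid i []) (r + c - i) 0)).sum,
         rc ++ (PySem.List.pyRange r (min m (r + c + 1)) 1).map (fun i => (i, r + c - i))) := by
  intro k
  induction k with
  | zero =>
    intro r c cs rc hk
    rw [pvWalkA, dif_neg (by omega), PySem.List.pyRange_one_eq_nil (by omega)]
    simp
  | succ k ih =>
    intro r c cs rc hk
    rw [pvWalkA]
    by_cases h : r < m ∧ -1 < c
    · rw [dif_pos h, ih (r + 1) (c - 1) _ _ (by omega)]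
      have hlt : r < min m (r + c + 1) := by omega
      rw [PySem.List.pyRange_one_cons hlt]
      have he : r + 1 + (c - 1) = r + c := by ring
      rw [he]
      have he2 : r + c - r = c := by ring
      simp only [List.map_cons, List.sum_cons, he2, Prod.mk.injEq]
      constructor
      · ring
      · rw [List.append_assoc]
        rfl
    · rw [dif_neg h, PySem.List.pyRange_one_eq_nil (by omega)]
      simp

-- == a per-diagonal body of A is exactly pvStep ==

lemma pv_body_eq_step (grid : List (List Int)) (m n r0 c0 d : Int)
    (acc : PySem.Dict (Int × Int) Int) (hd : r0 + c0 = d) (h0 : max 0 (d - n + 1) = r0) :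
    (pvWalkA grid m r0 c0 0 []).2.foldl
        (fun dAcc pair => dAcc.insert pair (pvWalkA grid m r0 c0 0 []).1) acc
      = pvStep (pvS grid m n) m n acc d := by
  rw [pvWalkA_spec grid m (m - r0).toNat r0 c0 0 [] (le_refl _)]
  rw [hd]
  unfold pvStep pvS pvRows
  rw [h0]
  simp only [zero_add, List.nil_append]

-- == empty-output helpers ==

lemma pv_flatMap_rows_nil (grid : List (List Int)) (m n lo hi : Int)
    (h : m ≤ 0 ∨ n < 0) :
    (PySem.List.pyRange lo hi 1).flatMap
        (fun d => (pvRows m n d).map (fun r => ((r, d - r), pvS grid m n d))) = [] := by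
  apply List.flatMap_eq_nil_iff.mpr
  intro d _
  unfold pvRows
  rw [PySem.List.pyRange_one_eq_nil (by omega)]
  rfl

-- == putting the two builds together ==

lemma A_items (grid : List (List Int)) (m n : Int) :
    ((PySem.List.pyRange 1 m 1).foldl (fun dAcc row =>
        (pvWalkA grid m row (n - 1) 0 []).2.foldl
          (fun dAcc pair => dAcc.insert pair (pvWalkA grid m row (n - 1) 0 []).1) dAcc)
      ((PySem.List.pyRange 0 n 1).foldl (fun dAcc col =>
        (pvWalkA grid m 0 col 0 []).2.foldl
          (fun dAcc pair => dAcc.insert pair (pvWalkA grid m 0 col 0 []).1) dAcc)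
        (PySem.Dict.empty : PySem.Dict (Int × Int) Int))).items = pvL grid m n := by
  by_cases hm : 1 ≤ m
  · -- rewrite the column loop into pvStep form
    have hcol : (PySem.List.pyRange 0 n 1).foldl (fun dAcc col =>
          (pvWalkA grid m 0 col 0 []).2.foldl
            (fun dAcc pair => dAcc.insert pair (pvWalkA grid m 0 col 0 []).1) dAcc)
          (PySem.Dict.empty : PySem.Dict (Int × Int) Int)
        = (PySem.List.pyRange 0 n 1).foldl (pvStep (pvS grid m n) m n)
            (PySem.Dict.empty : PySem.Dict (Int × Int) Int) := by
      apply PySem.List.foldl_congr_mem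
      intro acc col hmem
      have hcb := PySem.List.mem_pyRange_one.mp hmem
      exact pv_body_eq_step grid m n 0 col col acc (by omega) (by omega)
    -- rewrite the row loop into pvStep form over the shifted diagonal indices
    have hrow : ∀ dct, (PySem.List.pyRange 1 m 1).foldl (fun dAcc row =>
          (pvWalkA grid m row (n - 1) 0 []).2.foldl
            (fun dAcc pair => dAcc.insert pair (pvWalkA grid m row (n - 1) 0 []).1) dAcc) dct
        = (PySem.List.pyRange n (m + n - 1) 1).foldl (pvStep (pvS grid m n)  m n) dct := by
      intro dct
      rw [PySem.List.pyRange_one 1 m, PySem.List.pyRange_one n (m + n - 1),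
          List.foldl_map, List.foldl_map,
          show (m + n - 1 - n).toNat = (m - 1).toNat by omega]
      apply PySem.List.foldl_congr_mem
      intro acc k _
      exact pv_body_eq_step grid m n (1 + (k : Int)) (n - 1) (n + (k : Int)) acc
        (by ring) (by omega)
    rw [hcol, hrow]
    by_cases hn : 0 ≤ n
    · rw [← List.foldl_append,
          ← PySem.List.pyRange_one_append 0 n (m + n - 1) (by omega) (by omega)]
      have := pv_fold_steps (pvS grid m n) m n (m + n - 1).toNat 0
        (PySem.Dict.empty : PySem.Dict (Int × Int) Int) (by intro p hp; rw [pv_items_empty] at hp; simp at hp)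
      rw [show (0 : Int) + ((m + n - 1).toNat : Int) = m + n - 1 by omega] at this
      rw [this]
      rfl
    · -- n < 0 : the column range is empty and every diagonal has no cells
      rw [PySem.List.pyRange_one_eq_nil (show n ≤ 0 by omega), List.foldl_nil]
      have := pv_fold_steps (pvS grid m n) m n (m - 1).toNat n
        (PySem.Dict.empty : PySem.Dict (Int × Int) Int) (by intro p hp; rw [pv_items_empty] at hp; simp at hp)
      rw [show n + ((m - 1).toNat : Int) = m + n - 1 by omega] at this
      rw [this]
      rw [pv_flatMap_rows_nil grid m n n (m + n - 1) (by omega)]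
      unfold pvL
      rw [pv_flatMap_rows_nil grid m n 0 (m + n - 1) (by omega), pv_items_empty]
      rfl
  · -- m ≤ 0 : the row range is empty, every column walk is empty, and pvL has no cells
    have hbody : ∀ (c0 : Int) (acc : PySem.Dict (Int × Int) Int),
        (pvWalkA grid m 0 c0 0 []).2.foldl
            (fun dAcc pair => dAcc.insert pair (pvWalkA grid m 0 c0 0 []).1) acc = acc := by
      intro c0 acc
      rw [pvWalkA_spec grid m (m - 0).toNat 0 c0 0 [] (le_refl _),
          PySem.List.pyRange_one_eq_nil (show min m (0 + c0 + 1) ≤ 0 by omega)]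
      rfl
    rw [PySem.List.pyRange_one_eq_nil (show m ≤ 1 by omega), List.foldl_nil,
        PySem.List.foldl_congr_mem _ _ (fun acc (_ : Int) => acc) _
          (fun acc x _ => hbody x acc),
        PySem.List.foldl_ignore]
    unfold pvL
    rw [pv_flatMap_rows_nil grid m n 0 (m + n - 1) (by omega), pv_items_empty]

lemma B_items (grid : List (List Int)) (m n : Int) :
    ((PySem.List.pyRange 0 (m + n - 1) 1).foldl (fun res d =>
        (PySem.List.pyRange (max 0 (d - n + 1)) (min m (d + 1)) 1).foldl
          (fun res r => res.insert (r, d - r)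
            (((PySem.List.pyRange 0 m 1).foldl (fun ds r => (PySem.List.pyRange 0 n 1).foldl
                (fun ds c => ds.insert (r + c) (ds.getD (r + c) 0
                  + PySem.List.pyGetD (PySem.List.pyGetD grid r []) c 0)) ds)
              (PySem.Dict.empty : PySem.Dict Int Int)).getD d 0)) res)
      (PySem.Dict.empty : PySem.Dict (Int × Int) Int)).items = pvL grid m n := by
  have hb : (PySem.List.pyRange 0 (m + n - 1) 1).foldl (fun res d =>
        (PySem.List.pyRange (max 0 (d - n + 1)) (min m (d + 1)) 1).foldl
          (fun res r => res.insert (r, d - r)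
            (((PySem.List.pyRange 0 m 1).foldl (fun ds r => (PySem.List.pyRange 0 n 1).foldl
                (fun ds c => ds.insert (r + c) (ds.getD (r + c) 0
                  + PySem.List.pyGetD (PySem.List.pyGetD grid r []) c 0)) ds)
              (PySem.Dict.empty : PySem.Dict Int Int)).getD d 0)) res)
      (PySem.Dict.empty : PySem.Dict (Int × Int) Int)
      = (PySem.List.pyRange 0 (m + n - 1) 1).foldl (pvStep (pvS grid m n) m n)
          (PySem.Dict.empty : PySem.Dict (Int × Int) Int) := by
    apply PySem.List.foldl_congr_mem
    intro acc d _
    unfold pvStep pvRows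
    rw [List.foldl_map]
    apply PySem.List.foldl_congr_mem
    intro acc' r _
    rw [pv_ds_eq_pvS]
  rw [hb]
  by_cases h : 0 ≤ m + n - 1
  · have := pv_fold_steps (pvS grid m n) m n (m + n - 1).toNat 0
      (PySem.Dict.empty : PySem.Dict (Int × Int) Int) (by intro p hp; rw [pv_items_empty] at hp; simp at hp)
    rw [show (0 : Int) + ((m + n - 1).toNat : Int) = m + n - 1 by omega] at this
    rw [this]
    rfl
  · rw [PySem.List.pyRange_one_eq_nil (show m + n - 1 ≤ 0 by omega), List.foldl_nil]
    unfold pvL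
    rw [PySem.List.pyRange_one_eq_nil (show m + n - 1 ≤ 0 by omega)]
    rfl

lemma A_eq (grid : List (List Int)) (m n : Int) :
    sub_diagonal_sum grid m n = (pvL grid m n).map (fun p => (p.1.1, p.1.2, p.2)) := by
  unfold sub_diagonal_sum
  rw [A_items grid m n]

lemma B_eq (grid : List (List Int)) (m n : Int) :
    sub_diagonal_sum_alt grid m n = (pvL grid m n).map (fun p => (p.1.1, p.1.2, p.2)) := by
  unfold sub_diagonal_sum_alt
  rw [B_items grid m n]

-- ===== VERDICT (by name: the statement is the Claim_ definition above) =====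
theorem sub_diagonal_sum_spec : Claim_equal_sub_diagonal_sum := by
  intro grid m n _ _
  unfold Spec_sub_diagonal_sum
  rw [A_eq, B_eq]
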